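-- pv_equiv track=rewrite | github.com/yy/wiggum | src/wiggum/upgrade.py | add_missing_task_sections
-- ===== SOURCE A (Python) =====
-- def add_missing_task_sections(content: str) -> str:
--     """Add missing sections to TASKS.md.
--
--     Args:
--         content: Current TASKS.md content.
--
--     Returns:
--         Content with missing sections added.
--     """
--     lines = content.split("\n")
--     has_todo = any("## Todo" in line for line in lines)
--     has_done = any("## Done" in line for line in lines)
--
--     # If both exist, return unchanged
--     if has_todo and has_done:
--         return content
--
--     # Build new content preserving existing structure
--     new_lines = []
--     inserted_header = False
--
--     for line in lines:
--         # Ensure we have the header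
--         if line.startswith("# ") and not inserted_header:
--             new_lines.append(line)
--             new_lines.append("")
--             if not has_done:
--                 new_lines.append("## Done")
--                 new_lines.append("")
--             if not has_todo:
--                 new_lines.append("## Todo")
--                 new_lines.append("")
--             inserted_header = True
--         elif line == "## Done" or line == "## Todo":
--             new_lines.append(line)
--         else:
--             new_lines.append(line)
--
--     # If no header was found, add structure at the top
--     if not inserted_header:
--         result = ["# Tasks", ""]
--         if not has_done:
--             result.extend(["## Done", ""])
--         if not has_todo:
--             result.extend(["## Todo", ""])
--         result.extend(lines)
--         return "\n".join(result)
--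
--     return "\n".join(new_lines)
-- ===== SOURCE B (Python) =====
-- def add_missing_task_sections(content: str) -> str:
--     """Add missing Done/Todo sections to TASKS.md (find-and-splice version)."""
--     lines = content.split("\n")
--     has_todo = any("## Todo" in line for line in lines)
--     has_done = any("## Done" in line for line in lines)
--     if has_todo and has_done:
--         return content
--     block = []
--     if not has_done:
--         block.extend(["## Done", ""])
--     if not has_todo:
--         block.extend(["## Todo", ""])
--     idx = next((i for i, l in enumerate(lines) if l.startswith("# ")), None)
--     if idx is None:
--         return "\n".join(["# Tasks", ""] + block + lines)
--     return "\n".join(lines[: idx + 1] + [""] + block + lines[idx + 1 :])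
-- ===== Notes on version B (the rewrite author's own statement) =====
-- stated objective: simpler
-- what changed: Replaces A's flag-carrying rebuild loop (which re-appends every line while tracking inserted_header) with finding the index of the first top-level header line and splicing the missing section block in by list slicing.
import Mathlib
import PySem

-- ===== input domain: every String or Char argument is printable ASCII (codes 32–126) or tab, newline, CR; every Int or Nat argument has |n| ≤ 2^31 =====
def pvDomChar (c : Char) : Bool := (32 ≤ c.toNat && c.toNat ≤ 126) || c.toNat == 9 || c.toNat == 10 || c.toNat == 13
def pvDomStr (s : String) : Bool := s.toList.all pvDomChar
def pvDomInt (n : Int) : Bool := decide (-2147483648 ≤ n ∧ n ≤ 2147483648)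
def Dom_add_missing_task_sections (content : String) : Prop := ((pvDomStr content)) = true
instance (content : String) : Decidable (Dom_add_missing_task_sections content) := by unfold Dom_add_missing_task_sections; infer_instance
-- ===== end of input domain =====

-- B replaces A's flag-driven rebuild loop by find-the-header-index-then-splice (objective: simpler decomposition).

-- ===== PORT A =====
-- one step of A's 'for line in lines' loop; state = (new_lines, inserted_header)
def pvStepA (has_done has_todo : Bool) (st : List String × Bool) (line : String) : List String × Bool :=
  if PySem.Str.startswith line "# " && !st.2 then
    (st.1 ++ [line, ""]
        ++ (if !has_done then ["## Done", ""] else [])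
        ++ (if !has_todo then ["## Todo", ""] else []), true)
  else if line == "## Done" || line == "## Todo" then (st.1 ++ [line], st.2)
  else (st.1 ++ [line], st.2)

def add_missing_task_sections (content : String) : String :=
  let lines := (PySem.Str.split? content "\n").getD []  -- sep "\n" ≠ "", so split? is always some
  let has_todo := lines.any (fun l => PySem.Str.isIn "## Todo" l)
  let has_done := lines.any (fun l => PySem.Str.isIn "## Done" l)
  if has_todo && has_done then content
  else
    let st := lines.foldl (pvStepA has_done has_todo) ([], false)
    if !st.2 then
      PySem.Str.join "\n" (["# Tasks", ""]
        ++ (if !has_done then ["## Done", ""] else [])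
        ++ (if !has_todo then ["## Todo", ""] else [])
        ++ lines)
    else PySem.Str.join "\n" st.1

-- ===== PORT B =====
-- B's `next((i for i,l in enumerate(lines) if l.startswith('# ')), None)`
def pvFindHeaderIdx : List String → Nat → Option Nat
  | [], _ => none
  | l :: ls, i => if PySem.Str.startswith l "# " then some i else pvFindHeaderIdx ls (i + 1)

def add_missing_task_sections_alt (content : String) : String :=
  let lines := (PySem.Str.split? content "\n").getD []  -- sep "\n" ≠ "", so split? is always some
  let has_todo := lines.any (fun l => PySem.Str.isIn "## Todo" l)
  let has_done := lines.any (fun l => PySem.Str.isIn "## Done" l)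
  if has_todo && has_done then content
  else
    let block := (if !has_done then ["## Done", ""] else [])
        ++ (if !has_todo then ["## Todo", ""] else [])
    match pvFindHeaderIdx lines 0 with
    | none => PySem.Str.join "\n" (["# Tasks", ""] ++ block ++ lines)
    | some idx => PySem.Str.join "\n" (lines.take (idx + 1) ++ [""] ++ block ++ lines.drop (idx + 1))

-- ===== PRECONDITION & SPEC =====
def Spec_add_missing_task_sections (content : String) (out : String) : Prop := out = add_missing_task_sections_alt content
instance (content : String) (out : String) : Decidable (Spec_add_missing_task_sections content out) := by unfold Spec_add_missing_task_sections; infer_instance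

-- ===== CLAIM (what is proved, stated in full; the proofs are below) =====
def Claim_equal_add_missing_task_sections : Prop := ∀ (content : String), Dom_add_missing_task_sections content → Spec_add_missing_task_sections content (add_missing_task_sections content)

-- ===== LEMMAS AND PROOFS =====

-- once inserted_header is true A's loop only appends the remaining lines
lemma pvFoldA_true (hd ht : Bool) (ls : List String) : ∀ acc : List String,
    ls.foldl (pvStepA hd ht) (acc, true) = (acc ++ ls, true) := by
  induction ls with
  | nil => intro acc; simp
  | cons l ls ih =>
    intro acc
    simp only [List.foldl_cons, pvStepA, Bool.not_true, Bool.and_false,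
      Bool.false_eq_true, if_false, ite_self, ih, List.append_assoc,
      List.singleton_append]

lemma pvFindHeaderIdx_shift (ls : List String) : ∀ i : Nat,
    pvFindHeaderIdx ls i = (pvFindHeaderIdx ls 0).map (· + i) := by
  induction ls with
  | nil => intro i; simp [pvFindHeaderIdx]
  | cons l ls ih =>
    intro i
    simp only [pvFindHeaderIdx]
    by_cases h : PySem.Str.startswith l "# " = true
    · rw [if_pos h, if_pos h]; simp
    · rw [if_neg h, if_neg h, ih (i + 1), ih 1]
      cases pvFindHeaderIdx ls 0 with
      | none => rfl
      | some j => simp only [Option.map_some]; congr 1; omega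

-- A's loop from the initial state = B's find-then-splice, for any accumulator
lemma pvFoldA_eq (hd ht : Bool) (ls : List String) : ∀ acc : List String,
    ls.foldl (pvStepA hd ht) (acc, false) =
      (match pvFindHeaderIdx ls 0 with
       | none => (acc ++ ls, false)
       | some i => (acc ++ ls.take (i + 1) ++ [""]
            ++ (if !hd then ["## Done", ""] else [])
            ++ (if !ht then ["## Todo", ""] else [])
            ++ ls.drop (i + 1), true)) := by
  induction ls with
  | nil => intro acc; simp [pvFindHeaderIdx]
  | cons l ls ih =>
    intro acc
    simp only [List.foldl_cons, pvStepA, pvFindHeaderIdx, Bool.not_false, Bool.and_true]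
    by_cases h : PySem.Str.startswith l "# " = true
    · rw [if_pos h, if_pos h, pvFoldA_true]
      simp [List.append_assoc]
    · rw [if_neg h, if_neg h, ite_self, ih, pvFindHeaderIdx_shift ls 1]
      cases pvFindHeaderIdx ls 0 with
      | none => simp
      | some j =>
        simp only [Option.map_some, List.take_succ_cons, List.drop_succ_cons]
        simp [List.append_assoc]

-- ===== VERDICT (by name: the statement is the Claim_ definition above) =====
theorem add_missing_task_sections_spec : Claim_equal_add_missing_task_sections := by
  intro content _
  unfold Spec_add_missing_task_sections add_missing_task_sections add_missing_task_sections_alt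
  set lines := (PySem.Str.split? content "\n").getD [] with hl
  set ht := lines.any (fun l => PySem.Str.isIn "## Todo" l) with hht
  set hd := lines.any (fun l => PySem.Str.isIn "## Done" l) with hhd
  by_cases hb : (ht && hd) = true
  · rw [if_pos hb, if_pos hb]
  · rw [if_neg hb, if_neg hb, pvFoldA_eq]
    cases hfi : pvFindHeaderIdx lines 0 with
    | none => simp
    | some i => simp [List.append_assoc]
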